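-- pv_equiv track=rewrite | github.com/GEOS-DEV/geosPythonPackages | geos-posp/src/geos_posp/visu/pythonViewUtils/functionsFigure2DGenerator.py | propertiesPerIdentifier
-- ===== SOURCE A (Python) =====
-- def propertiesPerIdentifier( propertyNames: list[ str ] ) -> dict[ str, list[ str ] ]:
--     """Extract identifiers with associatied properties.
--
--     From a list of property names, extracts the identifier (name of the
--     region for flow property or name of a well for well property) and creates
--     a dictionnary with identifiers as keys and the properties containing them
--     for value in a list.
--
--     Args:
--         propertyNames (list[str]): property names
--             Example
--
--             .. code-block:: python
--
--                 [
--                 "WellControls1__BHP__Pa__Source1",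
--                 "WellControls1__TotalMassRate__kg/s__Source1",
--                 "WellControls2__BHP__Pa__Source1",
--                 "WellControls2__TotalMassRate__kg/s__Source1"
--                 ]
--
--     Returns:
--         dict[str, list[str]]: property identifiers
--             Example
--
--             .. code-block:: python
--
--                 {
--                     "WellControls1": [
--                     "WellControls1__BHP__Pa__Source1",
--                     "WellControls1__TotalMassRate__kg/s__Source1"
--                     ],
--                     "WellControls2": [
--                     "WellControls2__BHP__Pa__Source1",
--                     "WellControls2__TotalMassRate__kg/s__Source1"
--                     ]
--                 }
--     """
--     propsPerIdentfier: dict[ str, list[ str ] ] = {}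
--     for propertyName in propertyNames:
--         elements: list[ str ] = propertyName.split( "__" )
--         identifier: str = elements[ 0 ]
--         if identifier not in propsPerIdentfier:
--             propsPerIdentfier[ identifier ] = []
--         propsPerIdentfier[ identifier ].append( propertyName )
--     return propsPerIdentfier
-- ===== SOURCE B (Python) =====
-- def propertiesPerIdentifier(propertyNames):
--     # Two-pass: extract each name's key once, dedup keys in first-seen order,
--     # then build each group by filtering the (name, key) pairs per key.
--     keys = [name.split("__")[0] for name in propertyNames]
--     order = list(dict.fromkeys(keys))
--     return {k: [n for n, kk in zip(propertyNames, keys) if kk == k] for k in order}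
-- ===== Notes on version B (the rewrite author's own statement) =====
-- stated objective: alternative
-- what changed: Replaces the single-scan mutable dict build (membership test plus in-place append per element) with a two-pass strategy: precompute all keys, dedup them in first-seen order, then construct each group by a comprehension filtering the zipped (name, key) pairs.
import Mathlib
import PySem

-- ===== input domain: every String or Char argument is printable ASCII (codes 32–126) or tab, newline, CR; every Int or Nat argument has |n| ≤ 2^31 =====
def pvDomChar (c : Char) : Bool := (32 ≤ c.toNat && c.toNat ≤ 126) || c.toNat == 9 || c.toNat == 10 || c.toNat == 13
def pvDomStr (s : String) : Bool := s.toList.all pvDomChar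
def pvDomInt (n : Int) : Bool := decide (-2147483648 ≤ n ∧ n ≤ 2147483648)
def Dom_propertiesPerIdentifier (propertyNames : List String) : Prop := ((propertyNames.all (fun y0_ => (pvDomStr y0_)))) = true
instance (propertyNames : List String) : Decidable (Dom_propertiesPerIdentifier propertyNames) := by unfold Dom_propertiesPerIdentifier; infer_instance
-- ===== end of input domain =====

-- B replaces the single-scan mutable-dict build with a two-pass strategy (precompute keys,
-- dedup them in first-seen order, filter the zipped pairs per key); objective: alternative.


-- ===== PORT A =====
-- one loop step of A's for-loop (dict state); `elements[0]` is `headD ""`: split? with a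
-- non-empty separator always returns `some` of a non-empty list, so this is exact
def pvStepA (propsPerIdentfier : PySem.Dict String (List String)) (propertyName : String) :
    PySem.Dict String (List String) :=
  let elements : List String := (PySem.Str.split? propertyName "__").getD []
  let identifier : String := elements.headD ""
  let d := if propsPerIdentfier.contains identifier then propsPerIdentfier
           else propsPerIdentfier.insert identifier []
  d.modify identifier [] (fun l => l ++ [propertyName])

def propertiesPerIdentifier (propertyNames : List String) : List (String × List String) :=
  (propertyNames.foldl pvStepA PySem.Dict.empty).items

-- ===== PORT B =====
def pvKey (name : String) : String := ((PySem.Str.split? name "__").getD []).headD ""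

def propertiesPerIdentifier_alt (propertyNames : List String) : List (String × List String) :=
  let keys := propertyNames.map pvKey
  let order := PySem.List.dedup keys
  order.map (fun k => (k, (propertyNames.zip keys).filterMap
      (fun p => if p.2 == k then some p.1 else none)))

-- ===== PRECONDITION & SPEC =====
def Spec_propertiesPerIdentifier (propertyNames : List String) (out : List (String × List String)) : Prop := out = propertiesPerIdentifier_alt propertyNames
instance (propertyNames : List String) (out : List (String × List String)) : Decidable (Spec_propertiesPerIdentifier propertyNames out) := by unfold Spec_propertiesPerIdentifier; infer_instance

-- ===== CLAIM (what is proved, stated in full; the proofs are below) =====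
def Claim_equal_propertiesPerIdentifier : Prop := ∀ (propertyNames : List String), Dom_propertiesPerIdentifier propertyNames → Spec_propertiesPerIdentifier propertyNames (propertiesPerIdentifier propertyNames)

-- ===== LEMMAS AND PROOFS =====

-- B's zipped filterMap is a plain filter by key
theorem pvZipFilter (ns : List String) (k : String) :
    (ns.zip (ns.map pvKey)).filterMap (fun p => if p.2 == k then some p.1 else none)
    = ns.filter (fun n => pvKey n == k) := by
  induction ns with
  | nil => rfl
  | cons n t ih =>
    simp only [List.map_cons, List.zip_cons_cons, List.filterMap_cons, List.filter_cons]
    by_cases h : pvKey n == k <;> simp [h] <;> simpa using ih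

-- PySem.List.dedup of a snoc
theorem pvDedupSnoc (L : List String) (x : String) :
    PySem.List.dedup (L ++ [x])
    = if x ∈ L then PySem.List.dedup L else PySem.List.dedup L ++ [x] := by
  have hc : (PySem.Set.ofList L).contains x = decide (x ∈ L) := by
    simp [PySem.Set.contains, List.contains_eq_mem, PySem.Set.mem_ofList]
  have h1 : PySem.List.dedup (L ++ [x]) = PySem.Set.add (PySem.Set.ofList L) x := by
    simp [PySem.List.dedup, PySem.Set.ofList, List.foldl_append]
  rw [h1, PySem.Set.add, hc]
  by_cases h : x ∈ L <;> simp [h, PySem.List.dedup]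

-- getD on a dict whose items list is a map over a key list
theorem pvGetDMap (L : List String) (f : String → List String) (k : String) :
    (PySem.Dict.mk (L.map (fun kk => (kk, f kk)))).getD k []
    = if k ∈ L then f k else [] := by
  induction L with
  | nil => simp [PySem.Dict.getD, PySem.Dict.get?]
  | cons a t ih =>
    by_cases hak : a = k
    · subst hak; simp [PySem.Dict.getD, PySem.Dict.get?]
    · have hb : (a == k) = false := by simp [hak]
      have hstep : (PySem.Dict.mk ((a, f a) :: t.map (fun kk => (kk, f kk)))).getD k []
          = (PySem.Dict.mk (t.map (fun kk => (kk, f kk)))).getD k [] := by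
        simp [PySem.Dict.getD, PySem.Dict.get?, hb]
      rw [List.map_cons, hstep, ih]
      have hka : ¬ k = a := fun hh => hak hh.symm
      simp [List.mem_cons, hka]

-- contains on such a dict
theorem pvContainsMap (L : List String) (f : String → List String) (k : String) :
    (PySem.Dict.mk (L.map (fun kk => (kk, f kk)))).contains k = decide (k ∈ L) := by
  induction L with
  | nil => simp [PySem.Dict.contains]
  | cons a t ih =>
    simp only [PySem.Dict.contains] at ih ⊢
    by_cases h : a = k
    · simp [h, ih]
    · have h2 : ¬ k = a := fun hh => h hh.symm
      simp [h, h2, ih]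

-- loop invariant: A's dict after the fold, as a map over the deduped key list
theorem pvFoldInv (ns : List String) :
    (ns.foldl pvStepA PySem.Dict.empty).items
    = (PySem.List.dedup (ns.map pvKey)).map
        (fun k => (k, ns.filter (fun n => pvKey n == k))) := by
  induction ns using List.reverseRecOn with
  | nil => rfl
  | append_singleton ns n ih =>
    rw [List.foldl_append, List.foldl_cons, List.foldl_nil]
    have hdict : (ns.foldl pvStepA PySem.Dict.empty)
        = PySem.Dict.mk ((PySem.List.dedup (ns.map pvKey)).map
            (fun k => (k, ns.filter (fun m => pvKey m == k)))) := by
      cases h : ns.foldl pvStepA PySem.Dict.empty with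
      | mk items => rw [← h, PySem.Dict.ext_iff, ih]
    set L := PySem.List.dedup (ns.map pvKey) with hL
    set f : String → List String := fun k => ns.filter (fun m => pvKey m == k) with hf
    have hmemL : ∀ k, k ∈ L ↔ k ∈ ns.map pvKey := fun k => PySem.List.mem_dedup _ _
    have hkey : ((PySem.Str.split? n "__").getD []).headD "" = pvKey n := rfl
    simp only [pvStepA, hdict, hkey, List.map_append, List.map_cons, List.map_nil]
    rw [pvDedupSnoc, ← hL]
    by_cases hmem : pvKey n ∈ ns.map pvKey
    · -- key already present: overwrite that entry in place, others keep their filter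
      have hcont : (PySem.Dict.mk (L.map fun kk => (kk, f kk))).contains (pvKey n) = true := by
        rw [pvContainsMap]; simp [(hmemL _).mpr hmem]
      have hgd : (PySem.Dict.mk (L.map fun kk => (kk, f kk))).getD (pvKey n) [] = f (pvKey n) := by
        rw [pvGetDMap]; simp [(hmemL _).mpr hmem]
      rw [if_pos hmem, if_pos hcont, PySem.Dict.modify, hgd, PySem.Dict.insert, if_pos hcont]
      simp only [List.map_map]
      apply List.map_congr_left
      intro k hk
      by_cases he : k = pvKey n
      · subst he
        simp [Function.comp, hf, List.filter_append]
      · have hne : ¬ pvKey n = k := fun hh => he hh.symm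
        have h1 : (k == pvKey n) = false := by simp [he]
        have h2 : (pvKey n == k) = false := by simp [hne]
        simp [Function.comp, h1, h2, List.filter_append]
    · -- new key: appended at the end with the single new name
      have hcont : (PySem.Dict.mk (L.map fun kk => (kk, f kk))).contains (pvKey n) = false := by
        have hnm : ¬ pvKey n ∈ L := fun h => hmem ((hmemL _).mp h)
        rw [pvContainsMap]; simp [hnm]
      have hnc : ¬ ((PySem.Dict.mk (L.map fun kk => (kk, f kk))).contains (pvKey n) = true) := by
        simp [hcont]
      rw [if_neg hmem, if_neg hnc, PySem.Dict.insert, if_neg hnc]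
      rw [PySem.Dict.modify]
      have hfind : (L.map fun kk => (kk, f kk)).find? (fun p => p.1 == pvKey n) = none := by
        rw [List.find?_eq_none]
        intro p hp
        obtain ⟨kk, hkk, rfl⟩ := List.mem_map.mp hp
        have hne : ¬ kk = pvKey n := fun h => hmem (h ▸ (hmemL kk).mp hkk)
        simp [hne]
      have hgd : (PySem.Dict.mk (L.map (fun kk => (kk, f kk)) ++ [(pvKey n, [])])).getD (pvKey n) []
          = [] := by
        simp [PySem.Dict.getD, PySem.Dict.get?, List.find?_append, hfind]
      rw [hgd, PySem.Dict.insert]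
      have hcont2 : (PySem.Dict.mk (L.map (fun kk => (kk, f kk)) ++ [(pvKey n, [])])).contains
          (pvKey n) = true := by simp [PySem.Dict.contains]
      rw [if_pos hcont2]
      simp only [List.map_append, List.map_map, List.map_cons, List.map_nil]
      congr 1
      · apply List.map_congr_left
        intro k hk
        have hne' : ¬ pvKey n = k := fun h => hmem (h ▸ (hmemL k).mp hk)
        have hne'' : ¬ k = pvKey n := fun h => hne' h.symm
        have hb1 : (k == pvKey n) = false := by simp [hne'']
        have hb2 : (pvKey n == k) = false := by simp [hne']
        simp [Function.comp, hb1, hb2, List.filter_append]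
      · have hnil : ns.filter (fun m => pvKey m == pvKey n) = [] := by
          rw [List.filter_eq_nil_iff]
          intro m hm hbeq
          exact hmem (List.mem_map.mpr ⟨m, hm, by simpa using hbeq⟩)
        simp [List.filter_append, hnil]

-- ===== VERDICT (by name: the statement is the Claim_ definition above) =====
theorem propertiesPerIdentifier_spec : Claim_equal_propertiesPerIdentifier := by
  intro ns _
  show propertiesPerIdentifier ns = propertiesPerIdentifier_alt ns
  unfold propertiesPerIdentifier propertiesPerIdentifier_alt
  rw [pvFoldInv]
  exact List.map_congr_left (fun k _ => by rw [pvZipFilter])
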